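-- pv_equiv track=rewrite | github.com/jaskifstad/ComplexityNav_490 | crowd_sim/envs/grouping/grouping_functions.py | pair2cluster
-- ===== SOURCE A (Python) =====
-- def pair2cluster(pairwiseData,totalNum):
--
--     clusterNum = 0
--     clusterIndexList = [0] * totalNum
--
--     for i in range(len(pairwiseData)):
--         curPair = pairwiseData[i]
--         curPairAlabel = clusterIndexList[curPair[0]]
--         curPairBlabel = clusterIndexList[curPair[1]]
--
--         if curPairAlabel == 0 and curPairBlabel == 0:
--             clusterNum = clusterNum + 1
--             curPairLabel = clusterNum
--             clusterIndexList[curPair[0]] = curPairLabel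
--             clusterIndexList[curPair[1]] = curPairLabel
--         elif curPairAlabel != 0 and curPairBlabel == 0:
--             clusterIndexList[curPair[1]] = curPairAlabel
--         elif curPairBlabel != 0 and curPairAlabel == 0:
--             clusterIndexList[curPair[0]] = curPairBlabel
--         else:
--             combineLabel = min(curPairAlabel,curPairBlabel)
--             for j in range(len(clusterIndexList)):
--                 if clusterIndexList[j] == curPairAlabel or clusterIndexList[j] == curPairBlabel:
--                     clusterIndexList[j] = combineLabel
--     return clusterIndexList
-- ===== SOURCE B (Python) =====
-- def pair2cluster(pairwiseData, totalNum):
--     # Label-aliasing (union-find on cluster labels): instead of rescanning the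
--     # whole index list on every merge, record "bigger label -> smaller label"
--     # aliases and resolve labels through the alias chain at the end.
--     labels = [0] * totalNum
--     alias = {}
--     clusterNum = 0
--
--     def resolve(l):
--         while l in alias:
--             l = alias[l]
--         return l
--
--     for a, b in pairwiseData:
--         la = resolve(labels[a])
--         lb = resolve(labels[b])
--         if la == 0 and lb == 0:
--             clusterNum += 1
--             labels[a] = clusterNum
--             labels[b] = clusterNum
--         elif lb == 0:
--             labels[b] = la
--         elif la == 0:
--             labels[a] = lb
--         elif la != lb:
--             if la < lb:
--                 alias[lb] = la
--             else:
--                 alias[la] = lb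
--     return [resolve(l) for l in labels]
-- ===== Notes on version B (the rewrite author's own statement) =====
-- stated objective: faster
-- what changed: Replaces A's full rescan-and-relabel of the whole index list on every merge by a label-alias map (union-find on cluster labels, larger label aliased to smaller), resolving labels through the alias chain once at the end; cluster-creation numbering is unchanged.
import Mathlib
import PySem

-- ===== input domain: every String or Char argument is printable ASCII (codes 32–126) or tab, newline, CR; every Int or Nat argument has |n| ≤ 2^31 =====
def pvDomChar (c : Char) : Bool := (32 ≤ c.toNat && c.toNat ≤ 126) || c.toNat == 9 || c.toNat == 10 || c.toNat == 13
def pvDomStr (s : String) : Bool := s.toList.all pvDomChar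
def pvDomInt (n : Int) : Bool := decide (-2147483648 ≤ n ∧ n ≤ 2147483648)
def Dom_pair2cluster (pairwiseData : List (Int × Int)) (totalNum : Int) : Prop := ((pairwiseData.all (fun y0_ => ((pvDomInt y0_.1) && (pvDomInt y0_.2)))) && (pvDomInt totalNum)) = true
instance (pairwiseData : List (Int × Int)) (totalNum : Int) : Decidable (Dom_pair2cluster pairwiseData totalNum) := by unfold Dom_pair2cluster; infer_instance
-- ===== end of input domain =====

-- B replaces A's full rescan-and-relabel of the index list on every merge by a
-- label-alias map resolved at the end (union-find on labels); measurably faster, same values.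


-- ===== PORT A =====
-- Python `xs[i] = v` (negative index counts from the end); exact for
-- -len xs ≤ i < len xs — out-of-range raises IndexError, excluded by Pre_.
def pySetItem (xs : List Int) (i : Int) (v : Int) : List Int :=
  match PySem.List.pyIdx? xs.length i with
  | some k => xs.set k v
  | none => xs

-- one iteration of A's `for i in range(len(pairwiseData))` body; state = (clusterNum, clusterIndexList)
def stepA (s : Int × List Int) (p : Int × Int) : Int × List Int :=
  let la := PySem.List.pyGetD s.2 p.1 0
  let lb := PySem.List.pyGetD s.2 p.2 0
  if la = 0 ∧ lb = 0 then
    (s.1 + 1, pySetItem (pySetItem s.2 p.1 (s.1 + 1)) p.2 (s.1 + 1))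
  else if la ≠ 0 ∧ lb = 0 then (s.1, pySetItem s.2 p.2 la)
  else if lb ≠ 0 ∧ la = 0 then (s.1, pySetItem s.2 p.1 lb)
  else
    (s.1, (PySem.List.pyRange 0 (PySem.List.len s.2)).foldl
      (fun arr j =>
        if PySem.List.pyGetD arr j 0 = la ∨ PySem.List.pyGetD arr j 0 = lb
        then pySetItem arr j (min la lb) else arr) s.2)

def pair2cluster (pairwiseData : List (Int × Int)) (totalNum : Int) : List Int :=
  ((PySem.List.pyRange 0 (PySem.List.len pairwiseData)).foldl
    (fun s i => stepA s (PySem.List.pyGetD pairwiseData i (0, 0)))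
    (0, PySem.List.pyRepeat [0] totalNum)).2

-- ===== PORT B =====
-- Python's `while l in alias: l = alias[l]`: every alias maps a label to a strictly
-- smaller positive label, so l.toNat hops always suffice (fuel only makes the loop total).
def resolveF : Nat → PySem.Dict Int Int → Int → Int
  | 0, _, l => l
  | f + 1, al, l =>
    match al.get? l with
    | some v => resolveF f al v
    | none => l

def resolveB (al : PySem.Dict Int Int) (l : Int) : Int := resolveF l.toNat al l

-- one iteration of B's `for a, b in pairwiseData` body; state = (clusterNum, labels, alias)
def stepB (s : Int × List Int × PySem.Dict Int Int) (p : Int × Int) :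
    Int × List Int × PySem.Dict Int Int :=
  let la := resolveB s.2.2 (PySem.List.pyGetD s.2.1 p.1 0)
  let lb := resolveB s.2.2 (PySem.List.pyGetD s.2.1 p.2 0)
  if la = 0 ∧ lb = 0 then
    (s.1 + 1, pySetItem (pySetItem s.2.1 p.1 (s.1 + 1)) p.2 (s.1 + 1), s.2.2)
  else if lb = 0 then (s.1, pySetItem s.2.1 p.2 la, s.2.2)
  else if la = 0 then (s.1, pySetItem s.2.1 p.1 lb, s.2.2)
  else if la ≠ lb then
    (s.1, s.2.1, if la < lb then s.2.2.insert lb la else s.2.2.insert la lb)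
  else s

def pair2cluster_alt (pairwiseData : List (Int × Int)) (totalNum : Int) : List Int :=
  let s := pairwiseData.foldl stepB (0, PySem.List.pyRepeat [0] totalNum, PySem.Dict.empty)
  s.2.1.map (resolveB s.2.2)

-- ===== PRECONDITION & SPEC =====
-- Pre_: every pair indexes the list [0]*totalNum in range (Python's negative
-- indices included); outside it A raises IndexError. This is exactly A's return domain.
def Pre_pair2cluster (pairwiseData : List (Int × Int)) (totalNum : Int) : Prop :=
  ∀ p ∈ pairwiseData, (-totalNum ≤ p.1 ∧ p.1 < totalNum) ∧ (-totalNum ≤ p.2 ∧ p.2 < totalNum)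
instance (pairwiseData : List (Int × Int)) (totalNum : Int) : Decidable (Pre_pair2cluster pairwiseData totalNum) := by unfold Pre_pair2cluster; infer_instance

def pvWitness_pair2cluster : (List (Int × Int)) × Int := ([(0, 1), (2, 3), (1, 2), (-1, 0)], 4)

def Spec_pair2cluster (pairwiseData : List (Int × Int)) (totalNum : Int) (out : List Int) : Prop := out = pair2cluster_alt pairwiseData totalNum
instance (pairwiseData : List (Int × Int)) (totalNum : Int) (out : List Int) : Decidable (Spec_pair2cluster pairwiseData totalNum out) := by unfold Spec_pair2cluster; infer_instance

-- ===== CLAIM (what is proved, stated in full; the proofs are below) =====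
def Claim_equal_pair2cluster : Prop := ∀ (pairwiseData : List (Int × Int)) (totalNum : Int), Dom_pair2cluster pairwiseData totalNum → Pre_pair2cluster pairwiseData totalNum → Spec_pair2cluster pairwiseData totalNum (pair2cluster pairwiseData totalNum)

-- ===== LEMMAS AND PROOFS =====

-- Python index normalization for an in-range index
def normIdx (len : Nat) (i : Int) : Nat := if 0 ≤ i then i.toNat else len - (-i).toNat

theorem normIdx_lt (len : Nat) (i : Int) (h1 : -(len : Int) ≤ i) (h2 : i < len) :
    normIdx len i < len := by
  unfold normIdx; split_ifs <;> omega

theorem pyIdx?_normIdx (len : Nat) (i : Int) (h1 : -(len : Int) ≤ i) (h2 : i < len) :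
    PySem.List.pyIdx? len i = some (normIdx len i) := by
  simp [PySem.List.pyIdx?, normIdx]; split_ifs <;> simp

theorem pyGetD_normIdx (xs : List Int) (i : Int)
    (h1 : -(xs.length : Int) ≤ i) (h2 : i < xs.length) :
    PySem.List.pyGetD xs i 0 = xs.getD (normIdx xs.length i) 0 := by
  have hk := pyIdx?_normIdx xs.length i h1 h2
  have hlt := normIdx_lt xs.length i h1 h2
  simp [PySem.List.pyGetD, PySem.List.pyGet?, hk, List.getD_eq_getElem?_getD]

theorem pySetItem_normIdx (xs : List Int) (i : Int) (v : Int)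
    (h1 : -(xs.length : Int) ≤ i) (h2 : i < xs.length) :
    pySetItem xs i v = xs.set (normIdx xs.length i) v := by
  simp [pySetItem, pyIdx?_normIdx xs.length i h1 h2]

theorem getD_set (xs : List Int) (i j : Nat) (v : Int) :
    (xs.set i v).getD j 0 = if i = j ∧ j < xs.length then v else xs.getD j 0 := by
  simp [List.getD_eq_getElem?_getD, List.getElem?_set]
  split_ifs <;> simp_all

-- every alias binding points at a strictly smaller positive label
def AliasWF (al : PySem.Dict Int Int) : Prop :=
  ∀ k v, al.get? k = some v → 0 < v ∧ v < k

theorem aliasWF_get?_zero (al : PySem.Dict Int Int) (hwf : AliasWF al) :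
    al.get? 0 = none := by
  cases h : al.get? 0 with
  | none => rfl
  | some v => have := hwf 0 v h; omega

theorem resolveF_zero (al : PySem.Dict Int Int) (hwf : AliasWF al) (f : Nat) :
    resolveF f al 0 = 0 := by
  cases f with
  | zero => rfl
  | succ g => simp [resolveF, aliasWF_get?_zero al hwf]

theorem resolveF_eq (al : PySem.Dict Int Int) (hwf : AliasWF al) :
    ∀ (m : Nat) (x : Int), 0 ≤ x → x.toNat ≤ m →
      ∀ f1 f2, x.toNat ≤ f1 → x.toNat ≤ f2 → resolveF f1 al x = resolveF f2 al x := by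
  intro m
  induction m with
  | zero =>
    intro x hx hm f1 f2 _ _
    have : x = 0 := by omega
    subst this
    rw [resolveF_zero al hwf, resolveF_zero al hwf]
  | succ m ih =>
    intro x hx hm f1 f2 h1 h2
    by_cases hx0 : x = 0
    · subst hx0; rw [resolveF_zero al hwf, resolveF_zero al hwf]
    · have hx1 : 1 ≤ x.toNat := by omega
      obtain ⟨g1, rfl⟩ : ∃ g, f1 = g + 1 := ⟨f1 - 1, by omega⟩
      obtain ⟨g2, rfl⟩ : ∃ g, f2 = g + 1 := ⟨f2 - 1, by omega⟩
      simp only [resolveF]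
      cases hg : al.get? x with
      | none => rfl
      | some v =>
        have hv := hwf x v hg
        exact ih v (by omega) (by omega) g1 g2 (by omega) (by omega)

theorem resolveB_fuel (al : PySem.Dict Int Int) (hwf : AliasWF al) (x : Int) (hx : 0 ≤ x)
    (f : Nat) (hf : x.toNat ≤ f) : resolveF f al x = resolveB al x :=
  resolveF_eq al hwf x.toNat x hx le_rfl f x.toNat hf le_rfl

theorem resolveB_root (al : PySem.Dict Int Int) (x : Int) (h : al.get? x = none) :
    resolveB al x = x := by
  unfold resolveB
  cases hx : x.toNat with
  | zero => rfl
  | succ g => simp [resolveF, h]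

theorem resolveB_spec_aux (al : PySem.Dict Int Int) (hwf : AliasWF al) :
    ∀ (m : Nat) (x : Int), 0 ≤ x → x.toNat ≤ m →
      al.get? (resolveB al x) = none ∧ 0 ≤ resolveB al x ∧ resolveB al x ≤ x := by
  intro m
  induction m with
  | zero =>
    intro x hx hm
    have : x = 0 := by omega
    subst this
    have h0 : resolveB al 0 = 0 := rfl
    exact ⟨by rw [h0]; exact aliasWF_get?_zero al hwf, by rw [h0], by rw [h0]⟩
  | succ m ih =>
    intro x hx hm
    cases hg : al.get? x with
    | none =>
      rw [resolveB_root al x hg]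
      exact ⟨hg, hx, le_rfl⟩
    | some v =>
      have hv := hwf x v hg
      have hstep : resolveB al x = resolveB al v := by
        have hx1 : 1 ≤ x.toNat := by omega
        unfold resolveB
        obtain ⟨g, hgf⟩ : ∃ g, x.toNat = g + 1 := ⟨x.toNat - 1, by omega⟩
        rw [hgf]
        simp only [resolveF, hg]
        exact resolveB_fuel al hwf v (by omega) g (by omega)
      rw [hstep]
      have := ih v (by omega) (by omega)
      exact ⟨this.1, this.2.1, by omega⟩

theorem resolveB_spec (al : PySem.Dict Int Int) (hwf : AliasWF al) (x : Int) (hx : 0 ≤ x) :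
    al.get? (resolveB al x) = none ∧ 0 ≤ resolveB al x ∧ resolveB al x ≤ x :=
  resolveB_spec_aux al hwf x.toNat x hx le_rfl

theorem aliasWF_insert (al : PySem.Dict Int Int) (hwf : AliasWF al) (K m : Int)
    (h0 : 0 < m) (hmK : m < K) : AliasWF (al.insert K m) := by
  intro k v h
  rw [PySem.Dict.get?_insert] at h
  by_cases hk : k = K
  · simp [hk] at h; omega
  · simp [hk] at h; exact hwf k v h

theorem resolveB_insert_aux (al : PySem.Dict Int Int) (hwf : AliasWF al) (K m : Int)
    (hK : al.get? K = none) (hm : al.get? m = none) (h0 : 0 < m) (hmK : m < K) :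
    ∀ (b : Nat) (x : Int), 0 ≤ x → x.toNat ≤ b →
      resolveB (al.insert K m) x = if resolveB al x = K then m else resolveB al x := by
  have hwf' : AliasWF (al.insert K m) := aliasWF_insert al hwf K m h0 hmK
  intro b
  induction b with
  | zero =>
    intro x hx hb
    have : x = 0 := by omega
    subst this
    have h1 : resolveB (al.insert K m) 0 = 0 := rfl
    have h2 : resolveB al 0 = 0 := rfl
    rw [h1, h2, if_neg (by omega)]
  | succ b ih =>
    intro x hx hb
    by_cases hxK : x = K
    · subst hxK
      -- new dict: one hop x → m, then m is a root of the new dict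
      have hgi : (al.insert x m).get? x = some m := PySem.Dict.get?_insert_self al x m
      have hmroot : (al.insert x m).get? m = none := by
        rw [PySem.Dict.get?_insert]
        rw [if_neg (by omega)]
        exact hm
      have hx1 : 1 ≤ x.toNat := by omega
      have hL : resolveB (al.insert x m) x = m := by
        unfold resolveB
        obtain ⟨g, hgf⟩ : ∃ g, x.toNat = g + 1 := ⟨x.toNat - 1, by omega⟩
        rw [hgf]
        simp only [resolveF, hgi]
        rw [resolveB_fuel (al.insert x m) hwf' m (by omega) g (by omega)]
        exact resolveB_root _ m hmroot
      rw [hL, resolveB_root al x hK, if_pos rfl]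
    · have hg' : (al.insert K m).get? x = al.get? x := by
        rw [PySem.Dict.get?_insert, if_neg hxK]
      cases hg : al.get? x with
      | none =>
        rw [resolveB_root al x hg, resolveB_root _ x (hg' ▸ hg), if_neg hxK]
      | some v =>
        have hv := hwf x v hg
        have hx1 : 1 ≤ x.toNat := by omega
        obtain ⟨g, hgf⟩ : ∃ g, x.toNat = g + 1 := ⟨x.toNat - 1, by omega⟩
        have hstepN : resolveB (al.insert K m) x = resolveB (al.insert K m) v := by
          unfold resolveB
          rw [hgf]
          simp only [resolveF, hg' , hg]
          exact resolveB_fuel _ hwf' v (by omega) g (by omega)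
        have hstepO : resolveB al x = resolveB al v := by
          unfold resolveB
          rw [hgf]
          simp only [resolveF, hg]
          exact resolveB_fuel al hwf v (by omega) g (by omega)
        rw [hstepN, hstepO]
        exact ih v (by omega) (by omega)

theorem resolveB_insert (al : PySem.Dict Int Int) (hwf : AliasWF al) (K m : Int)
    (hK : al.get? K = none) (hm : al.get? m = none) (h0 : 0 < m) (hmK : m < K) :
    ∀ (x : Int), 0 ≤ x →
      resolveB (al.insert K m) x = if resolveB al x = K then m else resolveB al x :=
  fun x hx => resolveB_insert_aux al hwf K m hK hm h0 hmK x.toNat x hx le_rfl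

-- in-range condition for one pair against a list of length n
def InRangeP (n : Nat) (p : Int × Int) : Prop :=
  (-(n : Int) ≤ p.1 ∧ p.1 < n) ∧ (-(n : Int) ≤ p.2 ∧ p.2 < n)

-- the simulation invariant between A's state and B's state
def SimInv (n : Nat) (sA : Int × List Int) (sB : Int × List Int × PySem.Dict Int Int) : Prop :=
  sA.1 = sB.1 ∧ 0 ≤ sA.1 ∧
  sA.2.length = n ∧ sB.2.1.length = n ∧
  AliasWF sB.2.2 ∧
  (∀ k v, sB.2.2.get? k = some v → k ≤ sA.1) ∧
  (∀ j : Nat, j < n → 0 ≤ sB.2.1.getD j 0 ∧ sB.2.1.getD j 0 ≤ sA.1) ∧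
  (∀ j : Nat, j < n → sA.2.getD j 0 = resolveB sB.2.2 (sB.2.1.getD j 0))

-- A's inner relabel loop is a pointwise map
theorem normIdx_natCast (len : Nat) (k : Nat) : normIdx len (k : Int) = k := by
  simp [normIdx]

theorem relabel_aux (la lb mv : Int) (L : Nat) :
    ∀ (d k : Nat), k + d = L → ∀ (a : List Int), a.length = L →
      (PySem.List.pyRange (k : Int) (L : Int)).foldl
        (fun a j =>
          if PySem.List.pyGetD a j 0 = la ∨ PySem.List.pyGetD a j 0 = lb
          then pySetItem a j mv else a) a
      = a.take k ++ (a.drop k).map (fun x => if x = la ∨ x = lb then mv else x) := by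
  intro d
  induction d with
  | zero =>
    intro k hk a ha
    have hkL : (k : Int) = (L : Int) := by omega
    have h1 : PySem.List.pyRange (L : Int) (L : Int) = [] := by simp [PySem.List.pyRange]
    rw [hkL, h1, List.foldl_nil, List.take_of_length_le (by omega),
      List.drop_of_length_le (by omega), List.map_nil, List.append_nil]
  | succ d ih =>
    intro k hk a ha
    have hklt : k < L := by omega
    rw [PySem.List.pyRange_one_cons (by exact_mod_cast hklt)]
    rw [List.foldl_cons]
    have hb1 : -((a.length : Nat) : Int) ≤ (k : Int) := by omega
    have hb2 : (k : Int) < (a.length : Nat) := by omega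
    have hget : PySem.List.pyGetD a (k : Int) 0 = a.getD k 0 := by
      rw [pyGetD_normIdx a _ hb1 hb2, ha, normIdx_natCast]
    have hset : pySetItem a (k : Int) mv = a.set k mv := by
      rw [pySetItem_normIdx a _ mv hb1 hb2, ha, normIdx_natCast]
    have hkl : k < a.length := by omega
    have hgd : a.getD k 0 = a[k] := List.getD_eq_getElem a 0 hkl
    have hdropk : a.drop k = a[k] :: a.drop (k + 1) := List.drop_eq_getElem_cons hkl
    have hcast : ((k : Int) + 1) = ((k + 1 : Nat) : Int) := by omega
    by_cases htest : a.getD k 0 = la ∨ a.getD k 0 = lb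
    · rw [if_pos (by rw [hget]; exact htest), hset, hcast]
      rw [ih (k + 1) (by omega) (a.set k mv) (by simp [ha])]
      have htake : (a.set k mv).take (k + 1) = a.take k ++ [mv] := by
        rw [List.take_add_one, List.take_set,
          List.set_eq_of_length_le (by simp)]
        simp [hkl]
      have hdrop : (a.set k mv).drop (k + 1) = a.drop (k + 1) := by
        rw [List.drop_set, if_pos (by omega)]
      rw [htake, hdrop, hdropk]
      simp only [List.map_cons]
      rw [if_pos (by rw [← hgd]; exact htest)]
      simp only [List.append_assoc, List.singleton_append]
    · rw [if_neg (by rw [hget]; exact htest), hcast]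
      rw [ih (k + 1) (by omega) a ha]
      have htk : a.take (k + 1) = a.take k ++ [a[k]] := by
        rw [List.take_add_one]
        simp [List.getElem?_eq_getElem hkl]
      rw [htk, hdropk]
      simp only [List.map_cons]
      rw [if_neg (by rw [← hgd]; exact htest)]
      simp only [List.append_assoc, List.singleton_append]

theorem relabel_eq_map (arr : List Int) (la lb mv : Int) :
    (PySem.List.pyRange 0 (PySem.List.len arr)).foldl
      (fun a j =>
        if PySem.List.pyGetD a j 0 = la ∨ PySem.List.pyGetD a j 0 = lb
        then pySetItem a j mv else a) arr
    = arr.map (fun x => if x = la ∨ x = lb then mv else x) := by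
  have := relabel_aux la lb mv arr.length arr.length 0 (by omega) arr rfl
  simpa [PySem.List.len] using this

theorem pySetItem_len (xs : List Int) (i : Int) (v : Int) :
    (pySetItem xs i v).length = xs.length := by
  unfold pySetItem
  cases PySem.List.pyIdx? xs.length i <;> simp

theorem pySetItem_getD' (xs : List Int) (n : Nat) (hlen : xs.length = n) (i : Int) (v : Int)
    (h1 : -(n : Int) ≤ i) (h2 : i < n) (j : Nat) (hj : j < n) :
    (pySetItem xs i v).getD j 0 = if normIdx n i = j then v else xs.getD j 0 := by
  subst hlen
  rw [pySetItem_normIdx xs i v h1 h2, getD_set]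
  by_cases h : normIdx xs.length i = j <;> simp [h, hj]

theorem getD_map_lt (f : Int → Int) (l : List Int) (j : Nat) (hj : j < l.length) :
    (l.map f).getD j 0 = f (l.getD j 0) := by
  rw [List.getD_eq_getElem _ _ (by simpa using hj), List.getElem_map,
    List.getD_eq_getElem _ _ hj]

theorem get?_fresh (al : PySem.Dict Int Int) (c : Int)
    (hkb : ∀ k v, al.get? k = some v → k ≤ c) : al.get? (c + 1) = none := by
  cases h : al.get? (c + 1) with
  | none => rfl
  | some v => have := hkb _ _ h; omega

theorem step_preserves (n : Nat) (sA : Int × List Int) (sB : Int × List Int × PySem.Dict Int Int)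
    (p : Int × Int) (hp : InRangeP n p) (hinv : SimInv n sA sB) :
    SimInv n (stepA sA p) (stepB sB p) := by
  obtain ⟨cnA, arr⟩ := sA
  obtain ⟨cnB, lab, al⟩ := sB
  obtain ⟨pa, pb⟩ := p
  obtain ⟨hcn, hcn0, hlenA, hlenB, hwf, hkb, hlb, hmain⟩ := hinv
  simp only at hcn hcn0 hlenA hlenB hwf hkb hlb hmain
  obtain ⟨⟨hpa1, hpa2⟩, ⟨hpb1, hpb2⟩⟩ := hp
  subst hcn
  have hiAlt : normIdx n pa < n := normIdx_lt n pa hpa1 hpa2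
  have hiBlt : normIdx n pb < n := normIdx_lt n pb hpb1 hpb2
  have hgA : PySem.List.pyGetD arr pa 0 = arr.getD (normIdx n pa) 0 := by
    rw [pyGetD_normIdx arr pa (by rw [hlenA]; exact hpa1) (by rw [hlenA]; exact_mod_cast hpa2),
      hlenA]
  have hgB : PySem.List.pyGetD arr pb 0 = arr.getD (normIdx n pb) 0 := by
    rw [pyGetD_normIdx arr pb (by rw [hlenA]; exact hpb1) (by rw [hlenA]; exact_mod_cast hpb2),
      hlenA]
  have hgA' : PySem.List.pyGetD lab pa 0 = lab.getD (normIdx n pa) 0 := by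
    rw [pyGetD_normIdx lab pa (by rw [hlenB]; exact hpa1) (by rw [hlenB]; exact_mod_cast hpa2),
      hlenB]
  have hgB' : PySem.List.pyGetD lab pb 0 = lab.getD (normIdx n pb) 0 := by
    rw [pyGetD_normIdx lab pb (by rw [hlenB]; exact hpb1) (by rw [hlenB]; exact_mod_cast hpb2),
      hlenB]
  have hmA : arr.getD (normIdx n pa) 0 = resolveB al (lab.getD (normIdx n pa) 0) :=
    hmain _ hiAlt
  have hmB : arr.getD (normIdx n pb) 0 = resolveB al (lab.getD (normIdx n pb) 0) :=
    hmain _ hiBlt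
  have hra := hlb _ hiAlt
  have hrb := hlb _ hiBlt
  have hspecA := resolveB_spec al hwf (lab.getD (normIdx n pa) 0) hra.1
  have hspecB := resolveB_spec al hwf (lab.getD (normIdx n pb) 0) hrb.1
  set ra := lab.getD (normIdx n pa) 0 with hra_def
  set rb := lab.getD (normIdx n pb) 0 with hrb_def
  set la := resolveB al ra with hla_def
  set lb := resolveB al rb with hlb_def
  simp only [stepA, stepB, hgA, hgB, hgA', hgB', hmA, hmB]
  by_cases hla0 : la = 0 <;> by_cases hlb0 : lb = 0
  · -- both unlabeled: create a new cluster
    rw [if_pos ⟨hla0, hlb0⟩, if_pos ⟨hla0, hlb0⟩]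
    have hfresh : al.get? (cnA + 1) = none := get?_fresh al cnA hkb
    have hresv : resolveB al (cnA + 1) = cnA + 1 := resolveB_root al _ hfresh
    refine ⟨rfl, by simp; omega, ?_, ?_, hwf, fun k v h => by have := hkb k v h; simp; omega,
      ?_, ?_⟩
    · simp [pySetItem_len, hlenA]
    · simp [pySetItem_len, hlenB]
    · intro j hj
      simp only
      rw [pySetItem_getD' _ n (by simp [pySetItem_len, hlenB]) _ _ hpb1 hpb2 j hj,
        pySetItem_getD' _ n hlenB _ _ hpa1 hpa2 j hj]
      split_ifs with h1 h2
      · omega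
      · omega
      · have := (hlb j hj); omega
    · intro j hj
      simp only
      rw [pySetItem_getD' _ n (by simp [pySetItem_len, hlenA]) _ _ hpb1 hpb2 j hj,
        pySetItem_getD' _ n hlenA _ _ hpa1 hpa2 j hj,
        pySetItem_getD' _ n (by simp [pySetItem_len, hlenB]) _ _ hpb1 hpb2 j hj,
        pySetItem_getD' _ n hlenB _ _ hpa1 hpa2 j hj]
      split_ifs with h1 h2
      · exact hresv.symm
      · exact hresv.symm
      · exact hmain j hj
  · -- la labeled? no: la = 0, lb ≠ 0 → label a with lb
    rw [if_neg (by tauto), if_neg (by tauto), if_pos ⟨hlb0, hla0⟩,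
      if_neg (by tauto), if_neg (by tauto), if_pos hla0]
    have hlbv : 0 ≤ lb ∧ lb ≤ cnA := ⟨hspecB.2.1, le_trans hspecB.2.2 hrb.2⟩
    have hres : resolveB al lb = lb := resolveB_root al _ hspecB.1
    refine ⟨rfl, hcn0, by simp [pySetItem_len, hlenA], by simp [pySetItem_len, hlenB],
      hwf, hkb, ?_, ?_⟩
    · intro j hj
      simp only
      rw [pySetItem_getD' _ n hlenB _ _ hpa1 hpa2 j hj]
      split_ifs
      · exact hlbv
      · exact hlb j hj
    · intro j hj
      simp only
      rw [pySetItem_getD' _ n hlenA _ _ hpa1 hpa2 j hj,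
        pySetItem_getD' _ n hlenB _ _ hpa1 hpa2 j hj]
      split_ifs
      · exact hres.symm
      · exact hmain j hj
  · -- la ≠ 0, lb = 0 → label b with la
    rw [if_neg (by tauto), if_pos ⟨hla0, hlb0⟩,
      if_neg (by tauto), if_pos hlb0]
    have hlav : 0 ≤ la ∧ la ≤ cnA := ⟨hspecA.2.1, le_trans hspecA.2.2 hra.2⟩
    have hres : resolveB al la = la := resolveB_root al _ hspecA.1
    refine ⟨rfl, hcn0, by simp [pySetItem_len, hlenA], by simp [pySetItem_len, hlenB],
      hwf, hkb, ?_, ?_⟩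
    · intro j hj
      simp only
      rw [pySetItem_getD' _ n hlenB _ _ hpb1 hpb2 j hj]
      split_ifs
      · exact hlav
      · exact hlb j hj
    · intro j hj
      simp only
      rw [pySetItem_getD' _ n hlenA _ _ hpb1 hpb2 j hj,
        pySetItem_getD' _ n hlenB _ _ hpb1 hpb2 j hj]
      split_ifs
      · exact hres.symm
      · exact hmain j hj
  · -- both labeled: merge (or equal labels: no-op)
    rw [if_neg (by tauto), if_neg (by tauto), if_neg (by tauto),
      if_neg (by tauto), if_neg (by tauto), if_neg (by tauto)]
    have hla_pos : 0 < la := lt_of_le_of_ne hspecA.2.1 (Ne.symm hla0)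
    have hlb_pos : 0 < lb := lt_of_le_of_ne hspecB.2.1 (Ne.symm hlb0)
    have hlac : la ≤ cnA := le_trans hspecA.2.2 hra.2
    have hlbc : lb ≤ cnA := le_trans hspecB.2.2 hrb.2
    rw [relabel_eq_map]
    by_cases hlalb : la = lb
    · -- same cluster already: A's relabel is the identity pointwise
      rw [if_neg (by omega)]
      refine ⟨rfl, hcn0, by simp [hlenA], hlenB, hwf, hkb, hlb, ?_⟩
      intro j hj
      simp only
      rw [getD_map_lt _ _ j (by omega)]
      have := hmain j hj
      split_ifs with h
      · rcases h with h | h <;> omega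
      · exact this
    · rw [if_pos hlalb]
      -- insert max → min into the alias map
      have hins : ∀ (x : Int), 0 ≤ x →
          resolveB (if la < lb then al.insert lb la else al.insert la lb) x
            = if resolveB al x = max la lb then min la lb else resolveB al x := by
        intro x hx
        by_cases h : la < lb
        · rw [if_pos h]
          rw [resolveB_insert al hwf lb la hspecB.1 hspecA.1 hla_pos h x hx]
          rw [max_eq_right (by omega), min_eq_left (by omega)]
        · rw [if_neg h]
          rw [resolveB_insert al hwf la lb hspecA.1 hspecB.1 hlb_pos (by omega) x hx]
          rw [max_eq_left (by omega), min_eq_right (by omega)]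
      have hwf' : AliasWF (if la < lb then al.insert lb la else al.insert la lb) := by
        by_cases h : la < lb
        · rw [if_pos h]; exact aliasWF_insert al hwf lb la hla_pos h
        · rw [if_neg h]; exact aliasWF_insert al hwf la lb hlb_pos (by omega)
      have hkb' : ∀ k v, (if la < lb then al.insert lb la else al.insert la lb).get? k = some v
          → k ≤ cnA := by
        intro k v h
        by_cases hc : la < lb
        · rw [if_pos hc, PySem.Dict.get?_insert] at h
          by_cases hk : k = lb
          · omega
          · rw [if_neg hk] at h; exact hkb k v h
        · rw [if_neg hc, PySem.Dict.get?_insert] at h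
          by_cases hk : k = la
          · omega
          · rw [if_neg hk] at h; exact hkb k v h
      refine ⟨rfl, hcn0, by simp [hlenA], hlenB, hwf', hkb', hlb, ?_⟩
      intro j hj
      simp only
      rw [getD_map_lt _ _ j (by omega)]
      rw [hins _ (hlb j hj).1]
      have := hmain j hj
      rw [this]
      set r := resolveB al (lab.getD j 0) with hr_def
      by_cases h1 : r = la <;> by_cases h2 : r = lb
      · omega
      · rw [if_pos (by tauto)]
        by_cases hc : la < lb
        · rw [if_neg (by omega), min_eq_left (by omega)]
          exact h1.symm
        · rw [if_pos (by omega), min_eq_right (by omega)]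
      · rw [if_pos (by tauto)]
        by_cases hc : la < lb
        · rw [if_pos (by omega), min_eq_left (by omega)]
        · rw [if_neg (by omega), min_eq_right (by omega)]
          exact h2.symm
      · rw [if_neg (by tauto), if_neg (by omega)]

theorem fold_inv (ps : List (Int × Int)) (n : Nat) :
    ∀ (sA : Int × List Int) (sB : Int × List Int × PySem.Dict Int Int),
      SimInv n sA sB → (∀ p ∈ ps, InRangeP n p) →
      SimInv n (ps.foldl stepA sA) (ps.foldl stepB sB) := by
  induction ps with
  | nil => intro sA sB h _; exact h
  | cons q t ih =>
    intro sA sB h hr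
    simp only [List.foldl_cons]
    exact ih _ _ (step_preserves n sA sB q (hr q (by simp)) h)
      (fun p hp => hr p (by simp [hp]))

-- ===== VERDICT (by name: the statement is the Claim_ definition above) =====
theorem simInv_init (n : Nat) :
    SimInv n (0, List.replicate n 0) (0, List.replicate n 0, PySem.Dict.empty) := by
  refine ⟨rfl, le_rfl, by simp, by simp, ?_, ?_, ?_, ?_⟩
  · intro k v h; rw [PySem.Dict.get?_empty] at h; exact absurd h (by simp)
  · intro k v h; rw [PySem.Dict.get?_empty] at h; exact absurd h (by simp)
  · intro j hj
    rw [List.getD_replicate 0 hj]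
    omega
  · intro j hj
    rw [List.getD_replicate 0 hj]
    rfl

theorem pair2cluster_spec : Claim_equal_pair2cluster := by
  unfold Claim_equal_pair2cluster
  intro pd tn _hdom hpre
  unfold Spec_pair2cluster
  set n := tn.toNat with hn
  have hrange : ∀ p ∈ pd, InRangeP n p := by
    intro p hp
    have h := hpre p hp
    have htn : 0 < tn := by omega
    have hc : ((n : Nat) : Int) = tn := Int.toNat_of_nonneg (by omega)
    exact ⟨⟨by omega, by omega⟩, ⟨by omega, by omega⟩⟩
  have hrepl : PySem.List.pyRepeat [(0 : Int)] tn = List.replicate n 0 :=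
    PySem.List.pyRepeat_singleton 0 tn
  have hA : pair2cluster pd tn = (pd.foldl stepA (0, List.replicate n 0)).2 := by
    unfold pair2cluster
    rw [hrepl, PySem.List.foldl_pyRange_pyGetD pd (0, 0) stepA _ le_rfl]
    simp
  have hB : pair2cluster_alt pd tn
      = ((pd.foldl stepB (0, List.replicate n 0, PySem.Dict.empty)).2.1).map
          (resolveB (pd.foldl stepB (0, List.replicate n 0, PySem.Dict.empty)).2.2) := by
    unfold pair2cluster_alt
    rw [hrepl]
  rw [hA, hB]
  have hfin := fold_inv pd n _ _ (simInv_init n) hrange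
  obtain ⟨_, _, hlenA, hlenB, hwf, _, hlb, hmain⟩ := hfin
  apply List.ext_getElem
  · simp [hlenA, hlenB]
  · intro j hj1 hj2
    have hjn : j < n := by rw [← hlenA]; exact hj1
    have h1 : (pd.foldl stepA (0, List.replicate n 0)).2[j]
        = (pd.foldl stepA (0, List.replicate n 0)).2.getD j 0 :=
      (List.getD_eq_getElem _ _ hj1).symm
    rw [h1, hmain j hjn]
    rw [List.getElem_map]
    congr 1
    exact List.getD_eq_getElem _ _ (by rw [hlenB]; exact hjn)
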